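-- pv_equiv track=rewrite | github.com/AdebayoBraimah/convert_source | convert_source/cs_utils/utils.py | img_exclude
-- ===== SOURCE A (Python) =====
-- from typing import (
--     List,
--     Dict,
--     Optional,
--     Set,
--     Tuple,
--     Union
-- )
--
-- def img_exclude(img_list: List[str],
--                exclusion_list: Optional[List[str]] = None
--                ) -> List[str]:
--     """Constructs a new list with files that DO NOT contain words in the exclusion list.
--     Should this list be empty, then the original input list is returned.
--
--     Usage example:
--         >>> new_img_list = img_exclude(img_list, ["SWI", "PD","ProtonDensity"])
--
--     Arguments:
--         img_list: Input list of paths to image files.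
--         exclusion_list: Exclusion list that consists of keywords used to exclude files.
--
--     Returns:
--         List of image files that do not contain words in the exclusion list.
--     """
--     if (exclusion_list is None) or (len(exclusion_list) == 0):
--         img_set: Set = set(img_list)
--         new_list: List[str] = list(img_set)
--         new_list.sort(reverse=False)
--         return new_list
--     else:
--         img_set: Set = set(img_list)
--         exclusion_set: Set = set()
--         tmp_list: List[str] = []
--
--         for file in exclusion_list:
--             for img in img_list:
--                 if file.lower() in img.lower():
--                     tmp_list.append(img)
--             exclusion_set.update(set(tmp_list))
--         new_list: List[str] = list(img_set.difference(exclusion_set))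
--         new_list.sort(reverse=False)
--         return new_list
-- ===== SOURCE B (Python) =====
-- def img_exclude(img_list, exclusion_list=None):
--     """Single filtering pass: keep each image iff it matches no exclusion keyword,
--     then dedup and sort ascending (same result as A)."""
--     keywords = exclusion_list or []
--     kept = [img for img in img_list
--             if not any(k.lower() in img.lower() for k in keywords)]
--     return sorted(set(kept))
-- ===== Notes on version B (the rewrite author's own statement) =====
-- stated objective: faster
-- what changed: One direct filtering pass over img_list (keywords inner) replaces the keyword-outer double loop that accumulates every match into a never-reset tmp_list, re-converts it to a set per keyword, and then takes a set difference; the None/empty branch collapses into the general case since any() over no keywords is False.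
import Mathlib
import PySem

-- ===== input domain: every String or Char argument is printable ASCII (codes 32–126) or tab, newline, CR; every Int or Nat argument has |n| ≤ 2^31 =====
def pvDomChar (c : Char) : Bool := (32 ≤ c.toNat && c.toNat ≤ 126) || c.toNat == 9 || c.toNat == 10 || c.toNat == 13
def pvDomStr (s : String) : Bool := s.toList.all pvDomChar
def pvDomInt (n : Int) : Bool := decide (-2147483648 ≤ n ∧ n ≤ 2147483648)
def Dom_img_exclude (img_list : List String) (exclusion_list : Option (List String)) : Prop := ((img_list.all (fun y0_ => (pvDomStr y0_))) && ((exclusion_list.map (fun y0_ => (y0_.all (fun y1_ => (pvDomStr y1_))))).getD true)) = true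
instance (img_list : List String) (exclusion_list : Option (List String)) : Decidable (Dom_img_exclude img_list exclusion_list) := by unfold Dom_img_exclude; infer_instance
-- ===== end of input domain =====

-- B is a single filtering pass (images outer, keywords inner) instead of A's keyword-outer
-- double loop that accumulates excluded images and takes a set difference; same results.

-- shared match test: file.lower() in img.lower()
def pvMatch (file img : String) : Bool := PySem.Str.isIn (PySem.Str.lower file) (PySem.Str.lower img)

-- ===== PORT A =====
def img_exclude (img_list : List String) (exclusion_list : Option (List String)) : List String :=
  match exclusion_list with
  | none =>
      PySem.List.sorted (PySem.Set.ofList img_list) (fun x => x) false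
  | some ex =>
      if ex.length = 0 then
        PySem.List.sorted (PySem.Set.ofList img_list) (fun x => x) false
      else
        let imgSet : PySem.Set String := PySem.Set.ofList img_list
        let st := ex.foldl (fun (st : PySem.Set String × List String) file =>
          let tmp := img_list.foldl (fun tmp img =>
            if pvMatch file img then tmp ++ [img] else tmp) st.2
          (PySem.Set.update st.1 (PySem.Set.ofList tmp), tmp)) (PySem.Set.empty, [])
        PySem.List.sorted (PySem.Set.diff imgSet st.1) (fun x => x) false

-- ===== PORT B =====
def img_exclude_alt (img_list : List String) (exclusion_list : Option (List String)) : List String :=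
  let keywords := exclusion_list.getD []
  let kept := img_list.filter (fun img => !(keywords.any (fun k => pvMatch k img)))
  PySem.List.sorted (PySem.Set.ofList kept) (fun x => x) false

-- ===== PRECONDITION & SPEC =====
def Spec_img_exclude (img_list : List String) (exclusion_list : Option (List String)) (out : List String) : Prop := out = img_exclude_alt img_list exclusion_list
instance (img_list : List String) (exclusion_list : Option (List String)) (out : List String) : Decidable (Spec_img_exclude img_list exclusion_list out) := by unfold Spec_img_exclude; infer_instance

-- ===== CLAIM (what is proved, stated in full; the proofs are below) =====
def Claim_equal_img_exclude : Prop := ∀ (img_list : List String) (exclusion_list : Option (List String)), Dom_img_exclude img_list exclusion_list → Spec_img_exclude img_list exclusion_list (img_exclude img_list exclusion_list)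

-- ===== LEMMAS AND PROOFS =====

-- the inner loop just appends the matching images
lemma inner_loop (img_list : List String) (file : String) (tmp : List String) :
    img_list.foldl (fun tmp img => if pvMatch file img then tmp ++ [img] else tmp) tmp
      = tmp ++ img_list.filter (fun img => pvMatch file img) := by
  induction img_list generalizing tmp with
  | nil => simp
  | cons a t ih =>
      simp only [List.foldl_cons, List.filter_cons]
      by_cases h : pvMatch file a = true <;> simp [h, ih]

-- invariant of the outer loop: the exclusion set has the same members as tmp, and is Nodup
lemma outer_loop (img_list : List String) (ex : List String)
    (es : PySem.Set String) (tmp : List String)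
    (hnd : es.Nodup) (hmem : ∀ x, x ∈ es ↔ x ∈ tmp) :
    (ex.foldl (fun (st : PySem.Set String × List String) file =>
        let tmp := img_list.foldl (fun tmp img =>
          if pvMatch file img then tmp ++ [img] else tmp) st.2
        (PySem.Set.update st.1 (PySem.Set.ofList tmp), tmp)) (es, tmp)).1.Nodup ∧
    ∀ x, x ∈ (ex.foldl (fun (st : PySem.Set String × List String) file =>
        let tmp := img_list.foldl (fun tmp img =>
          if pvMatch file img then tmp ++ [img] else tmp) st.2
        (PySem.Set.update st.1 (PySem.Set.ofList tmp), tmp)) (es, tmp)).1 ↔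
      x ∈ tmp ∨ ∃ k ∈ ex, x ∈ img_list ∧ pvMatch k x := by
  induction ex generalizing es tmp with
  | nil => simpa using ⟨hnd, hmem⟩
  | cons f t ih =>
      simp only [List.foldl_cons]
      have h1 := inner_loop img_list f tmp
      set tmp' := img_list.foldl (fun tmp img => if pvMatch f img then tmp ++ [img] else tmp) tmp with htmp'
      have hnd' : (PySem.Set.update es (PySem.Set.ofList tmp')).Nodup :=
        PySem.Set.nodup_update _ _ hnd
      have hmem' : ∀ x, x ∈ PySem.Set.update es (PySem.Set.ofList tmp') ↔ x ∈ tmp' := by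
        intro x
        rw [PySem.Set.mem_update, PySem.Set.mem_ofList]
        constructor
        · rintro (h | h)
          · rw [h1]; exact List.mem_append_left _ ((hmem x).mp h)
          · exact h
        · exact Or.inr
      have := ih (PySem.Set.update es (PySem.Set.ofList tmp')) tmp' hnd' hmem'
      refine ⟨this.1, fun x => ?_⟩
      rw [this.2 x, h1]
      simp only [List.mem_append, List.mem_filter]
      constructor
      · rintro ((h | h) | h)
        · exact Or.inl h
        · exact Or.inr ⟨f, by simp, h.1, h.2⟩
        · obtain ⟨k, hk, h⟩ := h; exact Or.inr ⟨k, by simp [hk], h⟩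
      · rintro (h | ⟨k, hk, h⟩)
        · exact Or.inl (Or.inl h)
        · rcases List.mem_cons.mp hk with rfl | hk
          · exact Or.inl (Or.inr ⟨h.1, h.2⟩)
          · exact Or.inr ⟨k, hk, h⟩

-- both branches of A sort a Nodup list with the same members as B's deduped kept list
lemma sorted_eq_of_same_members (xs ys : List String)
    (hx : xs.Nodup) (hy : ys.Nodup) (h : ∀ a, a ∈ xs ↔ a ∈ ys) :
    PySem.List.sorted xs (fun x => x) false = PySem.List.sorted ys (fun x => x) false :=
  PySem.List.sorted_eq_sorted_of_perm xs ys (fun x => x) (fun _ _ h => h)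
    ((List.perm_ext_iff_of_nodup hx hy).mpr h)

theorem img_exclude_spec : Claim_equal_img_exclude := by
  unfold Claim_equal_img_exclude
  intro img_list exclusion_list _
  unfold Spec_img_exclude img_exclude img_exclude_alt
  match exclusion_list with
  | none => simp
  | some ex =>
      by_cases hex : ex.length = 0
      · rcases List.length_eq_zero_iff.mp hex with rfl
        simp
      · simp only [hex, if_false, Option.getD_some]
        have h := outer_loop img_list ex PySem.Set.empty [] (by simp [PySem.Set.empty]) (by simp [PySem.Set.empty])
        apply sorted_eq_of_same_members
        · exact PySem.Set.nodup_diff _ _ (PySem.Set.nodup_ofList _)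
        · exact PySem.Set.nodup_ofList _
        · intro a
          rw [PySem.Set.mem_diff, PySem.Set.mem_ofList, PySem.Set.mem_ofList, h.2 a,
            List.mem_filter]
          simp only [List.not_mem_nil, false_or, Bool.not_eq_eq_eq_not, Bool.not_true,
            List.any_eq_false]
          constructor
          · rintro ⟨h1, h2⟩
            exact ⟨h1, fun k hk => by simpa using fun hm => h2 ⟨k, hk, h1, hm⟩⟩
          · rintro ⟨h1, h2⟩
            refine ⟨h1, ?_⟩
            rintro ⟨k, hk, _, hm⟩; simpa [hm] using h2 k hk
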